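-- pv_equiv track=rewrite | github.com/meteor-gogogo/python | data_ctr_to_redis/scripts/ctr_data_to_redis_hour.py | get_bid_dict
-- ===== SOURCE A (Python) =====
-- def get_bid_dict(es_data, sensors_data, product_dict, ctr_dict):
--     for row in es_data:
--         pid = str(row.split(':')[0])
--         if pid == '':
--             continue
--         if pid not in product_dict.keys():
--             continue
--         bid = str(product_dict[pid]['brand_id'])
--         bid_pv_key = 'gbdt:3:' + bid + ':pv'
--         bid_pv_value_current = ctr_dict.get(bid_pv_key, 0)
--         bid_pv_value = 1 + bid_pv_value_current
--         ctr_dict.update({bid_pv_key: bid_pv_value})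
--     for row in sensors_data:
--         pid = str(row.split(':')[1])
--         if pid == '':
--             continue
--         if pid not in product_dict.keys():
--             continue
--         bid = str(product_dict[pid]['brand_id'])
--         bid_click_key = 'gbdt:3:' + bid + ':click'
--         bid_click_value_current = ctr_dict.get(bid_click_key, 0)
--         bid_click_value = 1 + bid_click_value_current
--         ctr_dict.update({bid_click_key: bid_click_value})
--     return ctr_dict
-- ===== SOURCE B (Python) =====
-- def get_bid_dict(es_data, sensors_data, product_dict, ctr_dict):
--     # Two-phase: aggregate per-brand counts first, then merge the counters
--     # into ctr_dict (mutated in place, like the original).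
--     def brand_counts(rows, idx):
--         counts = {}
--         for row in rows:
--             pid = str(row.split(':')[idx])
--             if pid == '':
--                 continue
--             if pid not in product_dict:
--                 continue
--             bid = str(product_dict[pid]['brand_id'])
--             counts[bid] = counts.get(bid, 0) + 1
--         return counts
--     for bid, n in brand_counts(es_data, 0).items():
--         key = 'gbdt:3:' + bid + ':pv'
--         ctr_dict[key] = ctr_dict.get(key, 0) + n
--     for bid, n in brand_counts(sensors_data, 1).items():
--         key = 'gbdt:3:' + bid + ':click'
--         ctr_dict[key] = ctr_dict.get(key, 0) + n
--     return ctr_dict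
-- ===== Notes on version B (the rewrite author's own statement) =====
-- stated objective: alternative
-- what changed: Per-row incremental ctr_dict updates are replaced by a two-phase count-then-merge: each source is first aggregated into a per-brand counter dict, which is then merged into ctr_dict one key per distinct brand.
import Mathlib
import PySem

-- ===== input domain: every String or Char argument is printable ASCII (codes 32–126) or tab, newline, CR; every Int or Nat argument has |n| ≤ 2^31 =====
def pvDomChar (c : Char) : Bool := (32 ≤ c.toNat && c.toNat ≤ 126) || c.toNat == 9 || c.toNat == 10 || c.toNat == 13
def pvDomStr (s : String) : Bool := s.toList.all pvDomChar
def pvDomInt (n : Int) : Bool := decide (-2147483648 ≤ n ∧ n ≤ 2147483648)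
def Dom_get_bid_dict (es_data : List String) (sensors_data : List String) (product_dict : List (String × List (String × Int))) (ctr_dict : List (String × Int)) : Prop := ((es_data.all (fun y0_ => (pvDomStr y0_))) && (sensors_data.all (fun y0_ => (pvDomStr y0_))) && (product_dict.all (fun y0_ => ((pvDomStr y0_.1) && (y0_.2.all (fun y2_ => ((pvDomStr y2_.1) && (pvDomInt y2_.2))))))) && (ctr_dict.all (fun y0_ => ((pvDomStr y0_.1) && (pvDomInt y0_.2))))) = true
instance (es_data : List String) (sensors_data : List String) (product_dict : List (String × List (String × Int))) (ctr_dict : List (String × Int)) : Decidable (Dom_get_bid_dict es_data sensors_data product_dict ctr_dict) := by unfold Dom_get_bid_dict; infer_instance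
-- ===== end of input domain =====

-- B replaces A's per-row ctr_dict updates by two-phase count-then-merge (per-brand counters, then one merge per distinct brand);
-- same return value; in Python both A and B mutate ctr_dict in place, the equivalence proved here is about the return value.


-- ===== PORT A =====
-- row.split(':'): ':' ≠ "" so Str.split? is always `some`; `.getD []` only discharges the Option.
def get_bid_dict (es_data : List String) (sensors_data : List String) (product_dict : List (String × List (String × Int))) (ctr_dict : List (String × Int)) : List (String × Int) :=
  let d1 := es_data.foldl (fun d row =>
    match PySem.List.pyGet? ((PySem.Str.split? row ":").getD []) 0 with
    | none => d        -- IndexError (unreachable: split(':') always yields ≥ 1 part)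
    | some pid =>
      if pid = "" then d
      else
        match (PySem.Dict.mk product_dict).get? pid with
        | none => d
        | some inner =>
          match (PySem.Dict.mk inner).get? "brand_id" with
          | none => d  -- KeyError in Python; excluded by Pre_
          | some b =>
            let bid := PySem.Int.toStr b
            let bid_pv_key := "gbdt:3:" ++ bid ++ ":pv"
            let bid_pv_value_current := d.getD bid_pv_key 0
            d.insert bid_pv_key (1 + bid_pv_value_current)) (PySem.Dict.mk ctr_dict)
  let d2 := sensors_data.foldl (fun d row =>
    match PySem.List.pyGet? ((PySem.Str.split? row ":").getD []) 1 with
    | none => d        -- IndexError in Python; excluded by Pre_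
    | some pid =>
      if pid = "" then d
      else
        match (PySem.Dict.mk product_dict).get? pid with
        | none => d
        | some inner =>
          match (PySem.Dict.mk inner).get? "brand_id" with
          | none => d  -- KeyError in Python; excluded by Pre_
          | some b =>
            let bid := PySem.Int.toStr b
            let bid_click_key := "gbdt:3:" ++ bid ++ ":click"
            let bid_click_value_current := d.getD bid_click_key 0
            d.insert bid_click_key (1 + bid_click_value_current)) d1
  d2.items

-- ===== PORT B =====
-- Source B's helper brand_counts(rows, idx): one counter dict per source.
def pvBrandCounts (product_dict : List (String × List (String × Int))) (rows : List String) (idx : Int) : PySem.Dict String Int :=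
  rows.foldl (fun counts row =>
    match PySem.List.pyGet? ((PySem.Str.split? row ":").getD []) idx with
    | none => counts   -- IndexError in Python; excluded by Pre_
    | some pid =>
      if pid = "" then counts
      else
        match (PySem.Dict.mk product_dict).get? pid with
        | none => counts
        | some inner =>
          match (PySem.Dict.mk inner).get? "brand_id" with
          | none => counts  -- KeyError in Python; excluded by Pre_
          | some b =>
            let bid := PySem.Int.toStr b
            counts.insert bid (counts.getD bid 0 + 1)) PySem.Dict.empty

def get_bid_dict_alt (es_data : List String) (sensors_data : List String) (product_dict : List (String × List (String × Int))) (ctr_dict : List (String × Int)) : List (String × Int) :=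
  let d1 := (pvBrandCounts product_dict es_data 0).items.foldl (fun d p =>
    let key := "gbdt:3:" ++ p.1 ++ ":pv"
    d.insert key (d.getD key 0 + p.2)) (PySem.Dict.mk ctr_dict)
  let d2 := (pvBrandCounts product_dict sensors_data 1).items.foldl (fun d p =>
    let key := "gbdt:3:" ++ p.1 ++ ":click"
    d.insert key (d.getD key 0 + p.2)) d1
  d2.items

-- ===== PRECONDITION & SPEC =====
-- Pre_ excludes exactly the inputs on which the Python A raises: a sensors row with no ':'
-- (IndexError on split(':')[1]) or a referenced product entry without a "brand_id" key (KeyError).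
def Pre_get_bid_dict (es_data : List String) (sensors_data : List String) (product_dict : List (String × List (String × Int))) (ctr_dict : List (String × Int)) : Prop :=
  (es_data.all (fun row =>
      let pid := ((PySem.Str.split? row ":").getD []).headD ""
      pid == "" ||
        (match (PySem.Dict.mk product_dict).get? pid with
         | none => true
         | some inner => ((PySem.Dict.mk inner).get? "brand_id").isSome))
   && sensors_data.all (fun row =>
      let parts := (PySem.Str.split? row ":").getD []
      decide (2 ≤ parts.length) &&
        (let pid := parts.getD 1 ""
         pid == "" ||
           (match (PySem.Dict.mk product_dict).get? pid with
            | none => true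
            | some inner => ((PySem.Dict.mk inner).get? "brand_id").isSome)))) = true
instance (es_data : List String) (sensors_data : List String) (product_dict : List (String × List (String × Int))) (ctr_dict : List (String × Int)) : Decidable (Pre_get_bid_dict es_data sensors_data product_dict ctr_dict) := by unfold Pre_get_bid_dict; infer_instance

def pvWitness_get_bid_dict : List String × List String × (List (String × List (String × Int))) × (List (String × Int)) :=
  (["p1:x", "zz:1"], ["e:p1", "e:p2"], [("p1", [("brand_id", 7)])], [("gbdt:3:7:pv", 2)])

def Spec_get_bid_dict (es_data : List String) (sensors_data : List String) (product_dict : List (String × List (String × Int))) (ctr_dict : List (String × Int)) (out : List (String × Int)) : Prop := out = get_bid_dict_alt es_data sensors_data product_dict ctr_dict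
instance (es_data : List String) (sensors_data : List String) (product_dict : List (String × List (String × Int))) (ctr_dict : List (String × Int)) (out : List (String × Int)) : Decidable (Spec_get_bid_dict es_data sensors_data product_dict ctr_dict out) := by unfold Spec_get_bid_dict; infer_instance

-- ===== CLAIM (what is proved, stated in full; the proofs are below) =====
def Claim_equal_get_bid_dict : Prop := ∀ (es_data : List String) (sensors_data : List String) (product_dict : List (String × List (String × Int))) (ctr_dict : List (String × Int)), Dom_get_bid_dict es_data sensors_data product_dict ctr_dict → Pre_get_bid_dict es_data sensors_data product_dict ctr_dict → Spec_get_bid_dict es_data sensors_data product_dict ctr_dict (get_bid_dict es_data sensors_data product_dict ctr_dict)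

-- ===== LEMMAS AND PROOFS =====

-- row → brand id option: the per-row parsing shared by both ports (proof-layer abstraction only)
def pvParse (product_dict : List (String × List (String × Int))) (idx : Int) (row : String) : Option String :=
  match PySem.List.pyGet? ((PySem.Str.split? row ":").getD []) idx with
  | none => none
  | some pid =>
    if pid = "" then none
    else
      match (PySem.Dict.mk product_dict).get? pid with
      | none => none
      | some inner =>
        match (PySem.Dict.mk inner).get? "brand_id" with
        | none => none
        | some b => some (PySem.Int.toStr b)

def pvBump (d : PySem.Dict String Int) (k : String) (n : Int) : PySem.Dict String Int :=
  d.insert k (d.getD k 0 + n)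

def pvMergeL (g : String → String) (d : PySem.Dict String Int) (l : List (String × Int)) : PySem.Dict String Int :=
  l.foldl (fun d p => pvBump d (g p.1) p.2) d

lemma pvBump_comm (D : PySem.Dict String Int) (K k' : String) (w : Int)
    (hK : D.contains K = true) (hne : K ≠ k') :
    pvBump (pvBump D K 1) k' w = pvBump (pvBump D k' w) K 1 := by
  unfold pvBump
  rw [PySem.Dict.getD_insert_of_ne _ _ _ (Ne.symm hne), PySem.Dict.getD_insert_of_ne _ _ _ hne]
  apply PySem.Dict.ext
  by_cases hc' : D.contains k' = true
  · rw [PySem.Dict.items_insert_of_contains _ _ (by rw [PySem.Dict.contains_insert]; simp [hc']),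
        PySem.Dict.items_insert_of_contains _ _ hK,
        PySem.Dict.items_insert_of_contains _ _ (by rw [PySem.Dict.contains_insert]; simp [hK]),
        PySem.Dict.items_insert_of_contains _ _ hc',
        List.map_map, List.map_map]
    apply List.map_congr_left
    intro p _
    by_cases h1 : p.1 = K
    · simp [Function.comp, h1, hne]
    · by_cases h2 : p.1 = k' <;> simp [Function.comp, h1, h2, Ne.symm hne]
  · have hc'f : D.contains k' = false := by simpa using hc'
    rw [PySem.Dict.items_insert_of_not_contains _ _
          (by rw [PySem.Dict.contains_insert]; simp [hc'f, Ne.symm hne]),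
        PySem.Dict.items_insert_of_contains _ _ hK,
        PySem.Dict.items_insert_of_contains _ _
          (by rw [PySem.Dict.contains_insert]; simp [hK]),
        PySem.Dict.items_insert_of_not_contains _ _ hc'f,
        List.map_append]
    simp [Ne.symm hne]

lemma pvBump_bump_self (D : PySem.Dict String Int) (K : String) (v : Int) :
    pvBump (pvBump D K v) K 1 = pvBump D K (v + 1) := by
  unfold pvBump
  rw [PySem.Dict.getD_insert_self, PySem.Dict.insert_insert_self, add_assoc]

lemma pvMergeL_push (g : String → String) (l : List (String × Int)) :
    ∀ (D : PySem.Dict String Int) (K : String), D.contains K = true →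
      (∀ p ∈ l, g p.1 ≠ K) →
      pvMergeL g (pvBump D K 1) l = pvBump (pvMergeL g D l) K 1 := by
  induction l with
  | nil => intro D K _ _; rfl
  | cons p l ih =>
    intro D K hK hl
    unfold pvMergeL
    simp only [List.foldl_cons]
    rw [show (pvBump (pvBump D K 1) (g p.1) p.2) = pvBump (pvBump D (g p.1) p.2) K 1 from
          pvBump_comm D K (g p.1) p.2 hK (Ne.symm (hl p (by simp)))]
    exact ih (pvBump D (g p.1) p.2) K
      (by unfold pvBump; rw [PySem.Dict.contains_insert]; simp [hK])
      (fun q hq => hl q (List.mem_cons_of_mem _ hq))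

lemma pvMerge_bump (g : String → String) (ginj : Function.Injective g)
    (c : PySem.Dict String Int) (hnd : c.keys.Nodup) (d : PySem.Dict String Int) (bid : String) :
    pvMergeL g d (pvBump c bid 1).items = pvBump (pvMergeL g d c.items) (g bid) 1 := by
  by_cases hc : c.contains bid = true
  · -- bid already counted: its (unique) entry's value goes up by one
    have hmem : bid ∈ c.items.map Prod.fst := by
      have := (PySem.Dict.contains_iff_mem_keys c bid).mp hc
      simpa [PySem.Dict.keys] using this
    obtain ⟨p, hpmem, hp1⟩ := List.mem_map.mp hmem
    obtain ⟨l₁, l₂, hitems⟩ := List.append_of_mem hpmem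
    have hp : p = (bid, p.2) := by cases p; simp at hp1; simp [hp1]
    rw [hp] at hitems
    have hnd' : (c.items.map Prod.fst).Nodup := hnd
    rw [hitems] at hnd'
    simp only [List.map_append, List.map_cons, List.nodup_append] at hnd'
    have hbid1 : bid ∉ l₁.map Prod.fst := fun h => hnd'.2.2 bid h bid (by simp) rfl
    have hbid2 : bid ∉ l₂.map Prod.fst := by
      have := hnd'.2.1
      simp only [List.nodup_cons] at this
      exact this.1
    have hv : c.getD bid 0 = p.2 :=
      PySem.Dict.getD_of_mem_items c (by rw [hitems]; simp) hnd 0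
    have hitems' : (pvBump c bid 1).items = l₁ ++ (bid, p.2 + 1) :: l₂ := by
      unfold pvBump
      rw [PySem.Dict.items_insert_of_contains _ _ hc, hitems, hv]
      rw [List.map_append, List.map_cons]
      congr 1
      · conv_rhs => rw [← List.map_id l₁]
        apply List.map_congr_left
        intro q hq
        have : q.1 ≠ bid := fun h => hbid1 (by rw [← h]; exact List.mem_map_of_mem hq)
        simp [this]
      · congr 1
        · simp
        · conv_rhs => rw [← List.map_id l₂]
          apply List.map_congr_left
          intro q hq
          have : q.1 ≠ bid := fun h => hbid2 (by rw [← h]; exact List.mem_map_of_mem hq)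
          simp [this]
    rw [hitems', hitems]
    unfold pvMergeL
    rw [List.foldl_append, List.foldl_append, List.foldl_cons, List.foldl_cons]
    set D₁ := l₁.foldl (fun d p => pvBump d (g p.1) p.2) d with hD₁
    have hcont : (pvBump D₁ (g bid) p.2).contains (g bid) = true := by
      unfold pvBump; rw [PySem.Dict.contains_insert]; simp
    have hl₂ : ∀ q ∈ l₂, g q.1 ≠ g bid := by
      intro q hq h
      exact hbid2 (by rw [← ginj h]; exact List.mem_map_of_mem hq)
    calc l₂.foldl (fun d p => pvBump d (g p.1) p.2) (pvBump D₁ (g bid) (p.2 + 1))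
        = l₂.foldl (fun d p => pvBump d (g p.1) p.2) (pvBump (pvBump D₁ (g bid) p.2) (g bid) 1) := by
          rw [pvBump_bump_self]
      _ = pvBump (l₂.foldl (fun d p => pvBump d (g p.1) p.2) (pvBump D₁ (g bid) p.2)) (g bid) 1 := by
          have h := pvMergeL_push g l₂ (pvBump D₁ (g bid) p.2) (g bid) hcont hl₂
          unfold pvMergeL at h
          exact h
  · -- first occurrence of bid: appended at the end of the counter
    have hcf : c.contains bid = false := by simpa using hc
    have hitems' : (pvBump c bid 1).items = c.items ++ [(bid, (0 : Int) + 1)] := by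
      unfold pvBump
      rw [PySem.Dict.getD_of_not_contains _ _ hcf,
          PySem.Dict.items_insert_of_not_contains _ _ hcf]
    rw [hitems']
    unfold pvMergeL
    rw [List.foldl_append]
    simp [pvBump]

lemma pvPhase (parse : String → Option String) (g : String → String) (ginj : Function.Injective g)
    (rows : List String) :
    ∀ (c : PySem.Dict String Int), c.keys.Nodup → ∀ (d : PySem.Dict String Int),
    rows.foldl (fun d row => match parse row with | none => d | some bid => pvBump d (g bid) 1)
        (pvMergeL g d c.items)
    = pvMergeL g d
        ((rows.foldl (fun c row => match parse row with | none => c | some bid => pvBump c bid 1) c).items) := by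
  induction rows with
  | nil => intro c _ d; rfl
  | cons r rows ih =>
    intro c hnd d
    simp only [List.foldl_cons]
    cases hp : parse r with
    | none => exact ih c hnd d
    | some bid =>
      show List.foldl (fun d row => match parse row with
              | none => d | some bid => pvBump d (g bid) 1)
            (pvBump (pvMergeL g d c.items) (g bid) 1) rows
          = pvMergeL g d
              ((List.foldl (fun c row => match parse row with
                  | none => c | some bid => pvBump c bid 1) (pvBump c bid 1) rows).items)
      rw [← pvMerge_bump g ginj c hnd d bid]
      exact ih (pvBump c bid 1)
        (by unfold pvBump; exact PySem.Dict.nodup_keys_insert _ _ _ hnd) d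

lemma pvAffix_inj (pre suf : String) : Function.Injective (fun s => pre ++ s ++ suf) := by
  intro a b h
  simp only at h
  have h' := congrArg String.toList h
  simp only [String.toList_append, List.append_assoc] at h'
  exact String.toList_inj.mp (List.append_cancel_right (List.append_cancel_left h'))

def pvCounts (pd : List (String × List (String × Int))) (idx : Int) (rows : List String) :
    PySem.Dict String Int :=
  rows.foldl (fun c row => match pvParse pd idx row with
    | none => c | some bid => pvBump c bid 1) PySem.Dict.empty

lemma pvEmptyItems : (PySem.Dict.empty : PySem.Dict String Int).items = [] := rfl

-- A's per-row body equals the abstract step (the only difference: `1 + cur` vs `cur + 1`)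
lemma pvStepA_eq (pd : List (String × List (String × Int))) (idx : Int) (pre suf : String)
    (d : PySem.Dict String Int) (row : String) :
    (match PySem.List.pyGet? ((PySem.Str.split? row ":").getD []) idx with
     | none => d
     | some pid =>
       if pid = "" then d
       else
         match (PySem.Dict.mk pd).get? pid with
         | none => d
         | some inner =>
           match (PySem.Dict.mk inner).get? "brand_id" with
           | none => d
           | some b =>
             d.insert (pre ++ PySem.Int.toStr b ++ suf)
               (1 + d.getD (pre ++ PySem.Int.toStr b ++ suf) 0))
    = (match pvParse pd idx row with
       | none => d
       | some bid => pvBump d (pre ++ bid ++ suf) 1) := by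
  unfold pvParse pvBump
  rcases h0 : PySem.List.pyGet? ((PySem.Str.split? row ":").getD []) idx with _ | pid
  · simp [h0]
  · simp only [h0]
    by_cases hp : pid = ""
    · simp [hp]
    · simp only [hp, if_false]
      rcases h1 : (PySem.Dict.mk pd).get? pid with _ | inner
      · simp [h1]
      · simp only [h1]
        rcases h2 : (PySem.Dict.mk inner).get? "brand_id" with _ | b
        · simp [h2]
        · simp [h2, Int.add_comm]

-- one whole A-phase (the literal loop of the port) = merge of the abstract counter
lemma pvA_phase (pd : List (String × List (String × Int))) (idx : Int) (pre suf : String)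
    (rows : List String) (base : PySem.Dict String Int) :
    rows.foldl (fun d row =>
      match PySem.List.pyGet? ((PySem.Str.split? row ":").getD []) idx with
      | none => d
      | some pid =>
        if pid = "" then d
        else
          match (PySem.Dict.mk pd).get? pid with
          | none => d
          | some inner =>
            match (PySem.Dict.mk inner).get? "brand_id" with
            | none => d
            | some b =>
              let bid := PySem.Int.toStr b
              let key := pre ++ bid ++ suf
              let cur := d.getD key 0
              d.insert key (1 + cur)) base
    = pvMergeL (fun s => pre ++ s ++ suf) base (pvCounts pd idx rows).items := by
  have h : (fun (d : PySem.Dict String Int) row =>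
      match PySem.List.pyGet? ((PySem.Str.split? row ":").getD []) idx with
      | none => d
      | some pid =>
        if pid = "" then d
        else
          match (PySem.Dict.mk pd).get? pid with
          | none => d
          | some inner =>
            match (PySem.Dict.mk inner).get? "brand_id" with
            | none => d
            | some b =>
              let bid := PySem.Int.toStr b
              let key := pre ++ bid ++ suf
              let cur := d.getD key 0
              d.insert key (1 + cur))
      = (fun (d : PySem.Dict String Int) row => match pvParse pd idx row with
          | none => d
          | some bid => pvBump d (pre ++ bid ++ suf) 1) := by
    funext d row
    exact pvStepA_eq pd idx pre suf d row
  rw [h]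
  have h2 := pvPhase (pvParse pd idx) (fun s => pre ++ s ++ suf) (pvAffix_inj pre suf)
      rows PySem.Dict.empty (by simp [PySem.Dict.keys, pvEmptyItems]) base
  rw [pvEmptyItems] at h2
  exact h2.trans rfl

-- B's counter helper computes the abstract counter
lemma pvB_counts (pd : List (String × List (String × Int))) (rows : List String) (idx : Int) :
    pvBrandCounts pd rows idx = pvCounts pd idx rows := by
  unfold pvBrandCounts pvCounts
  have h : (fun (counts : PySem.Dict String Int) row =>
      match PySem.List.pyGet? ((PySem.Str.split? row ":").getD []) idx with
      | none => counts
      | some pid =>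
        if pid = "" then counts
        else
          match (PySem.Dict.mk pd).get? pid with
          | none => counts
          | some inner =>
            match (PySem.Dict.mk inner).get? "brand_id" with
            | none => counts
            | some b =>
              let bid := PySem.Int.toStr b
              counts.insert bid (counts.getD bid 0 + 1))
      = (fun (c : PySem.Dict String Int) row => match pvParse pd idx row with
          | none => c
          | some bid => pvBump c bid 1) := by
    funext c row
    unfold pvParse pvBump
    rcases h0 : PySem.List.pyGet? ((PySem.Str.split? row ":").getD []) idx with _ | pid
    · simp [h0]
    · simp only [h0]
      by_cases hp : pid = ""
      · simp [hp]
      · simp only [hp, if_false]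
        rcases h1 : (PySem.Dict.mk pd).get? pid with _ | inner
        · simp [h1]
        · simp only [h1]
          rcases h2 : (PySem.Dict.mk inner).get? "brand_id" with _ | b
          · simp [h2]
          · simp [h2]
  rw [h]

-- B's merge loop is pvMergeL (definitional)
lemma pvB_merge (pre suf : String) (base : PySem.Dict String Int) (l : List (String × Int)) :
    l.foldl (fun d p =>
      let key := pre ++ p.1 ++ suf
      d.insert key (d.getD key 0 + p.2)) base
    = pvMergeL (fun s => pre ++ s ++ suf) base l := rfl

-- ===== VERDICT (by name: the statement is the Claim_ definition above) =====
theorem get_bid_dict_spec : Claim_equal_get_bid_dict := by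
  intro es_data sensors_data product_dict ctr_dict _ _
  unfold Spec_get_bid_dict get_bid_dict get_bid_dict_alt
  simp only [pvA_phase, pvB_merge, pvB_counts]
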